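-- pv_equiv track=rewrite | github.com/rpa0309/algop2 | program5.py | program5
-- ===== SOURCE A (Python) =====
-- from typing import List, Tuple
--
-- def program5(n: int, k: int, values: List[int]) -> Tuple[int, List[int]]:
--     """
--     Solution to Program 5
--
--     Parameters:
--     n (int): number of vaults
--     k (int): no two chosen vaults are within k positions of each other
--     values (List[int]): the values of the vaults
--
--     Returns:
--     int:  maximal total value
--     List[int]: the indices of the chosen vaults(1-indexed)
--     """
--     # Dynamic programming O(n) solution:
--     # dp[i] = best total using the first i vaults (1-indexed)
--     # dp[i] = max(dp[i-1], values[i-1] + dp[i-k-1])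
--     if n <= 0:
--         return 0, []
--
--     dp: List[int] = [0] * (n + 1)
--     choose: List[bool] = [False] * (n + 1)
--
--     # Build a choice array to reconstruct solution
--     for i in range(1, n + 1):
--         include = values[i - 1]
--         prev_index = i - k - 1
--         if prev_index >= 0:
--             include += dp[prev_index]
--
--         if include > dp[i - 1]:
--             dp[i] = include
--             choose[i] = True
--         else:
--             dp[i] = dp[i - 1]
--             choose[i] = False
--
--     # Reconstruct chosen indices in 1-indexed format
--     indices: List[int] = []
--     i = n
--     while i >= 1:
--         if choose[i]:
--             indices.append(i)
--             i -= (k + 1)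
--         else:
--             i -= 1
--
--     indices.reverse()
--     return dp[n], indices
-- ===== SOURCE B (Python) =====
-- from typing import List, Tuple
--
-- def program5(n: int, k: int, values: List[int]) -> Tuple[int, List[int]]:
--     # Forward DP carrying (total, chosen indices) pairs; no choose array,
--     # no backward reconstruction pass.
--     if n <= 0:
--         return 0, []
--     dp: List[Tuple[int, List[int]]] = [(0, [])]
--     for i in range(1, n + 1):
--         v = values[i - 1]
--         prev = i - k - 1
--         if prev >= 0:
--             t, idx = dp[prev]
--             cand = (v + t, idx + [i])
--         else:
--             cand = (v, [i])
--         if cand[0] > dp[i - 1][0]: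
--             dp.append(cand)
--         else:
--             dp.append(dp[i - 1])
--     return dp[n]
-- ===== Notes on version B (the rewrite author's own statement) =====
-- stated objective: simpler
-- what changed: A single forward DP that carries (total, chosen-index-list) pairs replaces A's boolean choose array plus the separate backward while-loop reconstruction and final reverse.
-- outside the precondition, e.g. on program5(1, -1, [0]): A returns (0, []), B raises IndexError
import Mathlib
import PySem

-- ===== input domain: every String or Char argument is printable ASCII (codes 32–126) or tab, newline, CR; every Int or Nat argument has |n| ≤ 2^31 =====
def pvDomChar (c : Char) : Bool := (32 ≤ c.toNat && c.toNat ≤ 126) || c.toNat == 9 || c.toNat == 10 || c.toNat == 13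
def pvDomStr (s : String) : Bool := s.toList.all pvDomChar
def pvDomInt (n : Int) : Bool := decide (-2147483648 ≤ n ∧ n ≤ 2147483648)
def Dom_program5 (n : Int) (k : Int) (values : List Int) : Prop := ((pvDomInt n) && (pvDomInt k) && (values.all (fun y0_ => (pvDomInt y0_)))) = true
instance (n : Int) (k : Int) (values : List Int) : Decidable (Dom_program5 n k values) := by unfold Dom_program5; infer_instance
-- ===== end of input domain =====

-- B replaces A's boolean choose array + backward reconstruction by one forward DP
-- carrying (total, chosen-index list) pairs (objective: simpler).

-- ===== PORT A =====
-- one body of A's 'for i in range(1, n+1)' loop over the state (dp, choose)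
def program5_stepA (values : List Int) (k : Int) (st : List Int × List Bool) (i : Int) :
    List Int × List Bool :=
  let dp := st.1
  let choose := st.2
  let include0 := PySem.List.pyGetD values (i - 1) 0
  let prev := i - k - 1
  let include_ := if prev ≥ 0 then include0 + PySem.List.pyGetD dp prev 0 else include0
  if include_ > PySem.List.pyGetD dp (i - 1) 0 then
    (PySem.List.pySetD dp i include_, PySem.List.pySetD choose i true)
  else
    (PySem.List.pySetD dp i (PySem.List.pyGetD dp (i - 1) 0), PySem.List.pySetD choose i false)

-- A's 'while i >= 1' reconstruction loop; fuel bounds the iteration count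
-- (inside Pre_ , k ≥ 0, i drops by at least 1 each round, so fuel n.toNat+1 is exact)
def program5_recon (choose : List Bool) (k : Int) : Int → Nat → List Int → List Int
  | _, 0, acc => acc
  | i, fuel + 1, acc =>
    if i ≥ 1 then
      if PySem.List.pyGetD choose i false then
        program5_recon choose k (i - (k + 1)) fuel (acc ++ [i])
      else
        program5_recon choose k (i - 1) fuel acc
    else acc

def program5 (n : Int) (k : Int) (values : List Int) : Int × List Int :=
  if n ≤ 0 then (0, [])
  else
    let st := (PySem.List.pyRange 1 (n + 1) 1).foldl (program5_stepA values k)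
      (List.replicate (n + 1).toNat 0, List.replicate (n + 1).toNat false)
    let indices := program5_recon st.2 k n (n.toNat + 1) []
    (PySem.List.pyGetD st.1 n 0, indices.reverse)

-- ===== PORT B =====
-- one body of B's loop over the growing dp list of (total, indices) pairs
def program5_stepB (values : List Int) (k : Int) (dp : List (Int × List Int)) (i : Int) :
    List (Int × List Int) :=
  let v := PySem.List.pyGetD values (i - 1) 0
  let prev := i - k - 1
  let cand :=
    if prev ≥ 0 then
      let q := PySem.List.pyGetD dp prev (0, [])
      (v + q.1, q.2 ++ [i])
    else (v, [i])
  if cand.1 > (PySem.List.pyGetD dp (i - 1) (0, [])).1 then dp ++ [cand]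
  else dp ++ [PySem.List.pyGetD dp (i - 1) (0, [])]

def program5_alt (n : Int) (k : Int) (values : List Int) : Int × List Int :=
  if n ≤ 0 then (0, [])
  else
    let dp := (PySem.List.pyRange 1 (n + 1) 1).foldl (program5_stepB values k)
      [((0 : Int), ([] : List Int))]
    PySem.List.pyGetD dp n (0, [])

-- ===== PRECONDITION & SPEC =====
-- Pre_ excludes negative k (there A raises IndexError, loops forever, or returns an
-- accidental value from reading not-yet-computed dp slots, and B raises IndexError)
-- and n > len(values) (there A raises IndexError).
def Pre_program5 (n : Int) (k : Int) (values : List Int) : Prop :=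
  n ≤ 0 ∨ (0 ≤ k ∧ n ≤ (values.length : Int))
instance (n : Int) (k : Int) (values : List Int) : Decidable (Pre_program5 n k values) := by
  unfold Pre_program5; infer_instance

def pvWitness_program5 : Int × Int × List Int := (3, 1, [5, 1, 7])

def Spec_program5 (n : Int) (k : Int) (values : List Int) (out : Int × List Int) : Prop :=
  out = program5_alt n k values
instance (n : Int) (k : Int) (values : List Int) (out : Int × List Int) :
    Decidable (Spec_program5 n k values out) := by unfold Spec_program5; infer_instance

-- ===== CLAIM (what is proved, stated in full; the proofs are below) =====
def Claim_equal_program5 : Prop := ∀ (n : Int) (k : Int) (values : List Int),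
  Dom_program5 n k values → Pre_program5 n k values →
  Spec_program5 n k values (program5 n k values)

-- ===== LEMMAS AND PROOFS =====

-- the common value both DPs compute: pvSpec i = (best total over first i vaults, its indices)
def pvSpec (values : List Int) (k : Int) : Nat → Int × List Int
  | 0 => (0, [])
  | i + 1 =>
    let v := values.getD i 0
    let prev : Int := (i : Int) + 1 - k - 1
    let p := min prev.toNat i
    let r := if prev ≥ 0 then
        (v + (pvSpec values k p).1, (pvSpec values k p).2 ++ [(i : Int) + 1])
      else (v, [(i : Int) + 1])
    if r.1 > (pvSpec values k i).1 then r else pvSpec values k i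
termination_by i => i
decreasing_by all_goals omega

lemma pvSpec_zero (values : List Int) (k : Int) : pvSpec values k 0 = (0, []) := by
  simp [pvSpec]

lemma pvSpec_succ (values : List Int) (k : Int) (s : Nat) :
    pvSpec values k (s + 1)
      = (if (if (0:Int) ≤ (s : Int) + 1 - k - 1 then
              (values.getD s 0 + (pvSpec values k (min ((s : Int) + 1 - k - 1).toNat s)).1,
               (pvSpec values k (min ((s : Int) + 1 - k - 1).toNat s)).2 ++ [(s : Int) + 1])
            else (values.getD s 0, [(s : Int) + 1])).1 > (pvSpec values k s).1 then
          (if (0:Int) ≤ (s : Int) + 1 - k - 1 then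
              (values.getD s 0 + (pvSpec values k (min ((s : Int) + 1 - k - 1).toNat s)).1,
               (pvSpec values k (min ((s : Int) + 1 - k - 1).toNat s)).2 ++ [(s : Int) + 1])
            else (values.getD s 0, [(s : Int) + 1]))
        else pvSpec values k s) := by
  rw [pvSpec]

lemma pvSpec_succ_false (values : List Int) (k : Int) (s : Nat)
    (h : ¬ (pvSpec values k s).1 < (pvSpec values k (s + 1)).1) :
    pvSpec values k (s + 1) = pvSpec values k s := by
  rw [pvSpec_succ] at h ⊢
  split_ifs at h ⊢ <;> first | rfl | (exfalso; omega)

lemma pvSpec_succ_true (values : List Int) (k : Int) (s : Nat)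
    (h : (pvSpec values k s).1 < (pvSpec values k (s + 1)).1) :
    (pvSpec values k (s + 1)).2
      = if (0:Int) ≤ (s : Int) + 1 - k - 1 then
          (pvSpec values k (min ((s : Int) + 1 - k - 1).toNat s)).2 ++ [(s : Int) + 1]
        else [(s : Int) + 1] := by
  rw [pvSpec_succ] at h ⊢
  split_ifs at h ⊢ <;> first | rfl | (exfalso; omega)

lemma pyGetD_nonneg {α : Type} (xs : List α) (i : Int) (d : α) (h : 0 ≤ i) :
    PySem.List.pyGetD xs i d = xs.getD i.toNat d := by
  simp [PySem.List.pyGetD, PySem.List.pyGet?_of_nonneg xs h, List.getD]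

lemma getD_set {α : Type} (xs : List α) (a t : Nat) (v d : α) :
    (xs.set a v).getD t d = if a = t ∧ a < xs.length then v else xs.getD t d := by
  simp only [List.getD, List.getElem?_set]
  by_cases h1 : a = t
  · subst h1
    by_cases h2 : a < xs.length
    · simp [h2]
    · have hn : xs[a]? = none := by rw [List.getElem?_eq_none_iff]; omega
      simp [h2]
  · simp [h1]

lemma invariant_B (values : List Int) (k : Int) (hk : 0 ≤ k) (j : Nat) :
    (PySem.List.pyRange 1 ((j : Int) + 1) 1).foldl (program5_stepB values k)
        [((0 : Int), ([] : List Int))]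
      = (List.range (j + 1)).map (pvSpec values k) := by
  induction j with
  | zero =>
    rw [PySem.List.pyRange_one_eq_nil (by norm_num)]
    simp [pvSpec_zero]
  | succ j ih =>
    have hcast : ((j + 1 : Nat) : Int) + 1 = ((j : Int) + 1) + 1 := by push_cast; ring
    rw [hcast, PySem.List.pyRange_one_succ_right (by omega), List.foldl_append,
        List.foldl_cons, List.foldl_nil, ih]
    -- one step of B on the list [pvSpec 0, …, pvSpec j]
    have hidx : ((j : Int) + 1 - 1) = (j : Int) := by ring
    have hlen : ((List.range (j + 1)).map (pvSpec values k)).length = j + 1 := by simp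
    have hdpj : PySem.List.pyGetD ((List.range (j + 1)).map (pvSpec values k))
        ((j : Int) + 1 - 1) ((0 : Int), ([] : List Int)) = pvSpec values k j := by
      rw [hidx, PySem.List.pyGetD_natCast, PySem.List.getD_map_range _ _ _ _ (by omega)]
    have hr : (List.range (j + 1 + 1)).map (pvSpec values k)
        = (List.range (j + 1)).map (pvSpec values k) ++ [pvSpec values k (j + 1)] := by
      rw [List.range_succ]; simp
    rw [hr]
    unfold program5_stepB
    simp only [hdpj]
    rw [pvSpec_succ]
    by_cases hp : (0:Int) ≤ (j : Int) + 1 - k - 1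
    · have hple : ((j : Int) + 1 - k - 1).toNat ≤ j := by omega
      have hmin : min ((j : Int) + 1 - k - 1).toNat j = ((j : Int) + 1 - k - 1).toNat := by
        omega
      have hq : PySem.List.pyGetD ((List.range (j + 1)).map (pvSpec values k))
          ((j : Int) + 1 - k - 1) ((0 : Int), ([] : List Int))
          = pvSpec values k (((j : Int) + 1 - k - 1).toNat) := by
        rw [pyGetD_nonneg _ _ _ hp, PySem.List.getD_map_range _ _ _ _ (by omega)]
      rw [if_pos (by omega : (0:Int) ≤ (j : Int) + 1 - k - 1)] at *
      simp only [hq, hmin, hidx, PySem.List.pyGetD_natCast]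
      split_ifs with h1
      · simp
      · simp
    · rw [if_neg hp] at *
      simp only [hidx, PySem.List.pyGetD_natCast]
      split_ifs with h1
      · simp
      · simp

lemma invariant_A (values : List Int) (k : Int) (hk : 0 ≤ k) (m : Nat) (j : Nat) (hj : j ≤ m) :
    (∀ t : Nat,
        ((PySem.List.pyRange 1 ((j : Int) + 1) 1).foldl (program5_stepA values k)
          (List.replicate (m + 1) 0, List.replicate (m + 1) false)).1.getD t 0
        = if t ≤ j then (pvSpec values k t).1 else 0) ∧
    (∀ t : Nat,
        ((PySem.List.pyRange 1 ((j : Int) + 1) 1).foldl (program5_stepA values k)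
          (List.replicate (m + 1) 0, List.replicate (m + 1) false)).2.getD t false
        = decide (1 ≤ t ∧ t ≤ j ∧ (pvSpec values k (t - 1)).1 < (pvSpec values k t).1)) ∧
    ((PySem.List.pyRange 1 ((j : Int) + 1) 1).foldl (program5_stepA values k)
          (List.replicate (m + 1) 0, List.replicate (m + 1) false)).1.length = m + 1 ∧
    ((PySem.List.pyRange 1 ((j : Int) + 1) 1).foldl (program5_stepA values k)
          (List.replicate (m + 1) 0, List.replicate (m + 1) false)).2.length = m + 1 := by
  induction j with
  | zero =>
    rw [PySem.List.pyRange_one_eq_nil (by norm_num)]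
    simp only [List.foldl_nil]
    refine ⟨fun t => ?_, fun t => ?_, by simp, by simp⟩
    · have hL : (List.replicate (m + 1) (0 : Int)).getD t 0 = 0 := by
        by_cases ht : t < m + 1
        · simp [List.getD, ht]
        · have hnone : (List.replicate (m + 1) (0 : Int))[t]? = none := by
            rw [List.getElem?_eq_none_iff]; simp; omega
          simp [List.getD, hnone]
      rw [hL]
      rcases Nat.eq_zero_or_pos t with h | h
      · subst h; simp [pvSpec_zero]
      · rw [if_neg (by omega)]
    · have hR : decide (1 ≤ t ∧ t ≤ 0 ∧ (pvSpec values k (t - 1)).1 < (pvSpec values k t).1)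
          = false := by simp; omega
      rw [hR]
      by_cases ht : t < m + 1
      · simp [List.getD, ht]
      · have hnone : (List.replicate (m + 1) false)[t]? = none := by
          rw [List.getElem?_eq_none_iff]; simp; omega
        simp [List.getD, hnone]
  | succ j ih =>
    obtain ⟨hdp, hch, hl1, hl2⟩ := ih (by omega)
    have hcast : ((j + 1 : Nat) : Int) + 1 = ((j : Int) + 1) + 1 := by push_cast; ring
    rw [hcast, PySem.List.pyRange_one_succ_right (by omega), List.foldl_append,
        List.foldl_cons, List.foldl_nil]
    set st := (PySem.List.pyRange 1 ((j : Int) + 1) 1).foldl (program5_stepA values k)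
      (List.replicate (m + 1) 0, List.replicate (m + 1) false) with hst
    have hidx : ((j : Int) + 1 - 1) = (j : Int) := by ring
    have hdpj : PySem.List.pyGetD st.1 ((j : Int) + 1 - 1) 0 = (pvSpec values k j).1 := by
      rw [hidx, PySem.List.pyGetD_natCast, hdp j]; simp
    have hset1 : ∀ (v : Int), PySem.List.pySetD st.1 ((j : Int) + 1) v
        = st.1.set (j + 1) v := by
      intro v
      have : ((j : Int) + 1) = ((j + 1 : Nat) : Int) := by push_cast; ring
      rw [this, PySem.List.pySetD_natCast]
    have hset2 : ∀ (v : Bool), PySem.List.pySetD st.2 ((j : Int) + 1) v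
        = st.2.set (j + 1) v := by
      intro v
      have : ((j : Int) + 1) = ((j + 1 : Nat) : Int) := by push_cast; ring
      rw [this, PySem.List.pySetD_natCast]
    -- the value written to dp[j+1] is (pvSpec (j+1)).1, and the branch taken is
    -- exactly whether (pvSpec j).1 < (pvSpec (j+1)).1
    have hinc : (if (0:Int) ≤ (j : Int) + 1 - k - 1 then
          PySem.List.pyGetD values ((j : Int) + 1 - 1) 0
            + PySem.List.pyGetD st.1 ((j : Int) + 1 - k - 1) 0
        else PySem.List.pyGetD values ((j : Int) + 1 - 1) 0)
        = (if (0:Int) ≤ (j : Int) + 1 - k - 1 then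
              (values.getD j 0 + (pvSpec values k (min ((j : Int) + 1 - k - 1).toNat j)).1,
               (pvSpec values k (min ((j : Int) + 1 - k - 1).toNat j)).2 ++ [(j : Int) + 1])
            else (values.getD j 0, [(j : Int) + 1])).1 := by
      by_cases hp : (0:Int) ≤ (j : Int) + 1 - k - 1
      · have hple : ((j : Int) + 1 - k - 1).toNat ≤ j := by omega
        have hmin : min ((j : Int) + 1 - k - 1).toNat j = ((j : Int) + 1 - k - 1).toNat := by
          omega
        rw [if_pos hp, if_pos hp, pyGetD_nonneg _ _ _ hp, hdp, if_pos hple, hidx,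
            PySem.List.pyGetD_natCast, hmin]
      · rw [if_neg hp, if_neg hp, hidx, PySem.List.pyGetD_natCast]
    set r : Int × List Int := (if (0:Int) ≤ (j : Int) + 1 - k - 1 then
        (values.getD j 0 + (pvSpec values k (min ((j : Int) + 1 - k - 1).toNat j)).1,
         (pvSpec values k (min ((j : Int) + 1 - k - 1).toNat j)).2 ++ [(j : Int) + 1])
      else (values.getD j 0, [(j : Int) + 1])) with hrdef
    have hspec : pvSpec values k (j + 1)
        = if r.1 > (pvSpec values k j).1 then r else pvSpec values k j := by
      rw [pvSpec_succ, ← hrdef]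
    unfold program5_stepA
    simp only [hdpj, hinc, hset1, hset2]
    by_cases hgt : r.1 > (pvSpec values k j).1
    · rw [if_pos hgt]
      have hS : pvSpec values k (j + 1) = r := by rw [hspec, if_pos hgt]
      refine ⟨fun t => ?_, fun t => ?_, by simp [hl1], by simp [hl2]⟩
      · rw [getD_set, hl1]
        by_cases ht : t = j + 1
        · subst ht
          rw [if_pos ⟨rfl, by omega⟩, if_pos (le_refl _), hS]
        · rw [if_neg (by omega), hdp]
          by_cases h1 : t ≤ j
          · rw [if_pos h1, if_pos (by omega)]
          · rw [if_neg h1, if_neg (by omega)]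
      · rw [getD_set, hl2]
        by_cases ht : t = j + 1
        · subst ht
          rw [if_pos ⟨rfl, by omega⟩]
          have hlt : (pvSpec values k j).1 < (pvSpec values k (j + 1)).1 := by
            rw [hS]; exact hgt
          simp [hlt]
        · rw [if_neg (by omega), hch]
          by_cases h1 : 1 ≤ t ∧ t ≤ j
          · simp [h1.1, h1.2, (show t ≤ j + 1 by omega)]
          · simp only [decide_eq_decide]
            constructor
            · rintro ⟨a, b, c⟩; exact ⟨a, by omega, c⟩
            · rintro ⟨a, b, c⟩; exact absurd ⟨a, by omega⟩ h1
    · rw [if_neg hgt]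
      have hS : pvSpec values k (j + 1) = pvSpec values k j := by rw [hspec, if_neg hgt]
      refine ⟨fun t => ?_, fun t => ?_, by simp [hl1], by simp [hl2]⟩
      · rw [getD_set, hl1]
        by_cases ht : t = j + 1
        · subst ht
          rw [if_pos ⟨rfl, by omega⟩, if_pos (le_refl _), hS]
        · rw [if_neg (by omega), hdp]
          by_cases h1 : t ≤ j
          · rw [if_pos h1, if_pos (by omega)]
          · rw [if_neg h1, if_neg (by omega)]
      · rw [getD_set, hl2]
        by_cases ht : t = j + 1
        · subst ht
          rw [if_pos ⟨rfl, by omega⟩]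
          have hlt : ¬ (pvSpec values k j).1 < (pvSpec values k (j + 1)).1 := by
            rw [hS]; omega
          simp [hlt]
        · rw [if_neg (by omega), hch]
          by_cases h1 : 1 ≤ t ∧ t ≤ j
          · simp [h1.1, h1.2, (show t ≤ j + 1 by omega)]
          · simp only [decide_eq_decide]
            constructor
            · rintro ⟨a, b, c⟩; exact ⟨a, by omega, c⟩
            · rintro ⟨a, b, c⟩; exact absurd ⟨a, by omega⟩ h1

lemma recon_eq (values : List Int) (k : Int) (hk : 0 ≤ k) (m : Nat) (choose : List Bool)
    (hch : ∀ t : Nat, choose.getD t false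
      = decide (1 ≤ t ∧ t ≤ m ∧ (pvSpec values k (t - 1)).1 < (pvSpec values k t).1))
    (fuel : Nat) (i : Int) (acc : List Int) (him : i ≤ (m : Int)) (hf : i.toNat < fuel) :
    program5_recon choose k i fuel acc = acc ++ (pvSpec values k i.toNat).2.reverse := by
  induction fuel generalizing i acc with
  | zero => omega
  | succ fuel ih =>
    simp only [program5_recon]
    by_cases hi : i ≥ 1
    · rw [if_pos hi, pyGetD_nonneg _ _ _ (by omega), hch i.toNat]
      have hti : ((i.toNat : Nat) : Int) = i := by omega
      have ht1 : 1 ≤ i.toNat := by omega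
      have htm : i.toNat ≤ m := by omega
      by_cases hlt : (pvSpec values k (i.toNat - 1)).1 < (pvSpec values k i.toNat).1
      · rw [if_pos (by simp [ht1, htm, hlt])]
        have hs : i.toNat = (i.toNat - 1) + 1 := by omega
        have h2 := pvSpec_succ_true values k (i.toNat - 1) (by rw [← hs]; exact hlt)
        rw [← hs] at h2
        have hprev : ((i.toNat - 1 : Nat) : Int) + 1 - k - 1 = i - (k + 1) := by omega
        rw [hprev] at h2
        by_cases hp : (0:Int) ≤ i - (k + 1)
        · rw [if_pos hp] at h2
          have hmin : min (i - (k + 1)).toNat (i.toNat - 1) = (i - (k + 1)).toNat := by omega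
          rw [hmin] at h2
          rw [ih (i - (k + 1)) (acc ++ [i]) (by omega) (by omega)]
          rw [h2]
          have : ((i.toNat - 1 : Nat) : Int) + 1 = i := by omega
          rw [this]
          simp
        · rw [if_neg hp] at h2
          rw [ih (i - (k + 1)) (acc ++ [i]) (by omega) (by omega)]
          have h0 : (i - (k + 1)).toNat = 0 := by omega
          rw [h0, pvSpec_zero, h2]
          have : ((i.toNat - 1 : Nat) : Int) + 1 = i := by omega
          rw [this]
          simp
      · rw [if_neg (by simp [hlt])]
        rw [ih (i - 1) acc (by omega) (by omega)]
        have hs : i.toNat = (i.toNat - 1) + 1 := by omega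
        have h2 := pvSpec_succ_false values k (i.toNat - 1) (by rw [← hs]; exact hlt)
        rw [← hs] at h2
        have : (i - 1).toNat = i.toNat - 1 := by omega
        rw [this, ← h2]
    · rw [if_neg hi]
      have h0 : i.toNat = 0 := by omega
      rw [h0, pvSpec_zero]
      simp

-- ===== VERDICT (by name: the statement is the Claim_ definition above) =====
theorem program5_spec : Claim_equal_program5 := by
  intro n k values _ hpre
  unfold Spec_program5
  by_cases hn : n ≤ 0
  · simp [program5, program5_alt, hn]
  · have hk : 0 ≤ k := by
      rcases hpre with h | h
      · omega
      · exact h.1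
    set m := n.toNat with hm
    have hmn : ((m : Nat) : Int) = n := by omega
    have hrep : (n + 1).toNat = m + 1 := by omega
    have hrange : n + 1 = ((m : Nat) : Int) + 1 := by omega
    obtain ⟨hdp, hch, hl1, hl2⟩ := invariant_A values k hk m m (le_refl m)
    unfold program5 program5_alt
    rw [if_neg hn, if_neg hn, hrep, hrange, invariant_B values k hk m]
    have hB : PySem.List.pyGetD ((List.range (m + 1)).map (pvSpec values k)) n
        ((0 : Int), ([] : List Int)) = pvSpec values k m := by
      rw [← hmn, PySem.List.pyGetD_natCast, PySem.List.getD_map_range _ _ _ _ (by omega)]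
    rw [hB]
    have hA1 : PySem.List.pyGetD ((PySem.List.pyRange 1 ((m : Int) + 1) 1).foldl
        (program5_stepA values k)
        (List.replicate (m + 1) 0, List.replicate (m + 1) false)).1 n 0
        = (pvSpec values k m).1 := by
      rw [← hmn, PySem.List.pyGetD_natCast, hdp m, if_pos (le_refl m)]
    have hA2 : program5_recon ((PySem.List.pyRange 1 ((m : Int) + 1) 1).foldl
        (program5_stepA values k)
        (List.replicate (m + 1) 0, List.replicate (m + 1) false)).2 k n (m + 1) []
        = (pvSpec values k m).2.reverse := by
      rw [recon_eq values k hk m _ hch (m + 1) n [] (by omega) (by omega)]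
      have : n.toNat = m := rfl
      rw [this]
      simp
    dsimp only
    rw [hA1, hA2, List.reverse_reverse]
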